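-- pv_equiv track=rewrite | github.com/rkechols/Advent2020 | day06/customs_counter.py | count_declarations
-- ===== SOURCE A (Python) =====
-- from typing import List
--
-- def count_declarations(group_declarations_: List[str]) -> int:
-- 	group_declarations = list()
-- 	for s in group_declarations_:
-- 		if s != "":
-- 			group_declarations.append(s)
-- 	letters = set()
-- 	for c in group_declarations[0]:
-- 		letters.add(c)
-- 	for declaration in group_declarations[1:]:
-- 		this_set = set()
-- 		for c in declaration:
-- 			this_set.add(c)
-- 		letters = letters.intersection(this_set)
-- 	return len(letters)
-- ===== SOURCE B (Python) =====
-- from typing import List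
--
-- def count_declarations(group_declarations_: List[str]) -> int:
-- 	kept = [s for s in group_declarations_ if s != ""]
-- 	n = len(kept)
-- 	counts = {}
-- 	for s in kept:
-- 		for c in dict.fromkeys(s):  # each letter at most once per declaration
-- 			counts[c] = counts.get(c, 0) + 1
-- 	return sum(1 for v in counts.values() if v == n)
-- ===== Notes on version B (the rewrite author's own statement) =====
-- stated objective: alternative
-- what changed: Replaces A's iterated set intersections with a single per-letter frequency table built over the deduplicated letters of each kept declaration, returning the count of letters whose tally equals the number of kept declarations.
import Mathlib
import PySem

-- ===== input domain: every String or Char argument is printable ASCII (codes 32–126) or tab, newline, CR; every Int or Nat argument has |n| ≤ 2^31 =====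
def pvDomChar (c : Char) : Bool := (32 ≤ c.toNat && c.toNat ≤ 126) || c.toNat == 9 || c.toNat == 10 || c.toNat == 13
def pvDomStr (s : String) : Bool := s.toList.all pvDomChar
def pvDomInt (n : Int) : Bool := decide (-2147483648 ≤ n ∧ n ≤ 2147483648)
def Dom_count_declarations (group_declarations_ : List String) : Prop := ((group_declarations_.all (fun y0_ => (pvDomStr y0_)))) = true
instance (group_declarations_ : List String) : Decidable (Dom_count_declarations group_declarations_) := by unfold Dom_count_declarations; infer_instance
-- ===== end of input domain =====

-- B replaces A's iterated set intersections with one per-letter frequency table; alternative decomposition, not claimed faster.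

-- ===== PORT A =====
def count_declarations (group_declarations_ : List String) : Int :=
  let group_declarations : List String :=
    group_declarations_.foldl (fun acc s => if s != "" then acc ++ [s] else acc) []
  let letters : PySem.Set Char :=
    (PySem.List.pyGetD group_declarations 0 "").toList.foldl PySem.Set.add PySem.Set.empty
  let letters : PySem.Set Char :=
    (PySem.List.slice group_declarations (some 1) none).foldl
      (fun letters declaration =>
        PySem.Set.inter letters (declaration.toList.foldl PySem.Set.add PySem.Set.empty))
      letters
  PySem.Set.len letters

-- ===== PORT B =====
def count_declarations_alt (group_declarations_ : List String) : Int :=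
  let kept : List String := group_declarations_.filter (fun s => s != "")
  let n : Int := PySem.List.len kept
  let counts : PySem.Dict Char Int :=
    kept.foldl
      (fun d s => (PySem.List.dedup s.toList).foldl (fun d c => d.insert c (d.getD c 0 + 1)) d)
      PySem.Dict.empty
  ((counts.values.countP (fun v => v == n) : Nat) : Int)

-- ===== PRECONDITION & SPEC =====
-- Pre_ excludes exactly the inputs where A raises IndexError: lists whose strings are all empty.
def Pre_count_declarations (group_declarations_ : List String) : Prop :=
  ∃ s ∈ group_declarations_, s ≠ ""
instance (group_declarations_ : List String) : Decidable (Pre_count_declarations group_declarations_) := by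
  unfold Pre_count_declarations; infer_instance
def pvWitness_count_declarations : List String := (["ab", "b"])

def Spec_count_declarations (group_declarations_ : List String) (out : Int) : Prop :=
  out = count_declarations_alt group_declarations_
instance (group_declarations_ : List String) (out : Int) : Decidable (Spec_count_declarations group_declarations_ out) := by
  unfold Spec_count_declarations; infer_instance

-- ===== CLAIM (what is proved, stated in full; the proofs are below) =====
def Claim_equal_count_declarations : Prop := ∀ (group_declarations_ : List String), Dom_count_declarations group_declarations_ → Pre_count_declarations group_declarations_ → Spec_count_declarations group_declarations_ (count_declarations group_declarations_)

-- ===== LEMMAS AND PROOFS =====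

-- B's counter: the tally of c is the number of declarations in l containing c (per-declaration dedup).
theorem getD_counts (l : List String) (d : PySem.Dict Char Int) (c : Char) :
    (l.foldl
      (fun d s => (PySem.List.dedup s.toList).foldl (fun d c => d.insert c (d.getD c 0 + 1)) d)
      d).getD c 0
    = d.getD c 0 + (l.countP (fun s => decide (c ∈ s.toList)) : Int) := by
  induction l generalizing d with
  | nil => simp
  | cons s l ih =>
    simp only [List.foldl_cons, ih, PySem.Dict.getD_foldl_insert_add_one, List.countP_cons]
    by_cases h : c ∈ s.toList
    · rw [List.count_eq_one_of_mem (PySem.List.nodup_dedup _) ((PySem.List.mem_dedup _ _).mpr h)]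
      simp [h]; ring
    · rw [List.count_eq_zero.mpr (fun hc => h ((PySem.List.mem_dedup _ _).mp hc))]
      simp [h]

-- B's counter keys: membership.
theorem mem_keys_counts (l : List String) (d : PySem.Dict Char Int) (c : Char) :
    c ∈ (l.foldl
      (fun d s => (PySem.List.dedup s.toList).foldl (fun d c => d.insert c (d.getD c 0 + 1)) d)
      d).keys
    ↔ c ∈ d.keys ∨ ∃ s ∈ l, c ∈ s.toList := by
  induction l generalizing d with
  | nil => simp
  | cons s l ih =>
    simp only [List.foldl_cons, ih, PySem.Dict.keys_foldl_insert, PySem.Set.mem_update,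
      PySem.List.mem_dedup, List.mem_cons]
    constructor
    · rintro (( h | h) | ⟨t, ht, hc⟩)
      · exact .inl h
      · exact .inr ⟨s, .inl rfl, h⟩
      · exact .inr ⟨t, .inr ht, hc⟩
    · rintro (h | ⟨t, (rfl | ht), hc⟩)
      · exact .inl (.inl h)
      · exact .inl (.inr hc)
      · exact .inr ⟨t, ht, hc⟩

-- B's counter keys stay Nodup.
theorem nodup_keys_counts (l : List String) (d : PySem.Dict Char Int) (h : d.keys.Nodup) :
    (l.foldl
      (fun d s => (PySem.List.dedup s.toList).foldl (fun d c => d.insert c (d.getD c 0 + 1)) d)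
      d).keys.Nodup := by
  induction l generalizing d with
  | nil => exact h
  | cons s l ih =>
    exact ih _ (PySem.Dict.nodup_keys_foldl_insert _ _ _ h)

-- A's intersection fold: membership characterisation.
theorem mem_inter_fold (l : List String) (L : PySem.Set Char) (c : Char) :
    c ∈ l.foldl (fun letters declaration =>
        PySem.Set.inter letters (declaration.toList.foldl PySem.Set.add PySem.Set.empty)) L
    ↔ c ∈ L ∧ ∀ s ∈ l, c ∈ s.toList := by
  induction l generalizing L with
  | nil => simp
  | cons s l ih =>
    have hm : ∀ (cs : List Char) (x : Char),
        x ∈ List.foldl PySem.Set.add PySem.Set.empty cs ↔ x ∈ cs := by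
      intro cs x
      rw [show List.foldl PySem.Set.add PySem.Set.empty cs = PySem.Set.ofList cs from rfl]
      exact PySem.Set.mem_ofList (y := x) (xs := cs)
    rw [List.foldl_cons, ih]
    simp only [PySem.Set.mem_inter, hm, List.mem_cons]
    constructor
    · rintro ⟨⟨h1, h2⟩, h3⟩
      exact ⟨h1, fun t ht => ht.elim (fun e => e ▸ h2) (h3 t)⟩
    · rintro ⟨h1, h2⟩
      exact ⟨⟨h1, h2 s (.inl rfl)⟩, fun t ht => h2 t (.inr ht)⟩

-- A's intersection fold preserves Nodup.
theorem nodup_inter_fold (l : List String) (L : PySem.Set Char) (h : L.Nodup) :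
    (l.foldl (fun letters declaration =>
        PySem.Set.inter letters (declaration.toList.foldl PySem.Set.add PySem.Set.empty)) L).Nodup := by
  induction l generalizing L with
  | nil => exact h
  | cons s l ih => exact ih _ (PySem.Set.nodup_inter _ _ h)

-- ===== VERDICT (by name: the statement is the Claim_ definition above) =====
theorem count_declarations_spec : Claim_equal_count_declarations := by
  intro gs _ hpre
  unfold Spec_count_declarations count_declarations count_declarations_alt
  simp only [PySem.List.foldl_append_if_eq_filter, List.nil_append]
  have hof : ∀ cs : List Char, List.foldl PySem.Set.add PySem.Set.empty cs = PySem.Set.ofList cs :=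
    fun cs => rfl
  have hne : gs.filter (fun s => s != "") ≠ [] := by
    obtain ⟨s, hs, hsne⟩ := hpre
    exact List.ne_nil_of_mem (List.mem_filter.mpr ⟨hs, by simpa using hsne⟩)
  obtain ⟨k0, rest, hk⟩ := List.exists_cons_of_ne_nil hne
  rw [hk, PySem.List.pyGetD_zero_cons, PySem.List.slice_from_one, List.tail_cons, hof]
  -- B side: the counter dict over kept = k0 :: rest
  have hkeysnd : ((k0 :: rest).foldl
      (fun d s => (PySem.List.dedup s.toList).foldl (fun d c => d.insert c (d.getD c 0 + 1)) d)
      (PySem.Dict.empty : PySem.Dict Char Int)).keys.Nodup :=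
    nodup_keys_counts _ _ (by simp [PySem.Dict.keys_empty])
  rw [PySem.Dict.values_eq_map_keys _ hkeysnd 0, List.countP_map]
  have hgd : ∀ c : Char, ((k0 :: rest).foldl
      (fun d s => (PySem.List.dedup s.toList).foldl (fun d c => d.insert c (d.getD c 0 + 1)) d)
      (PySem.Dict.empty : PySem.Dict Char Int)).getD c 0
      = ((k0 :: rest).countP (fun s => decide (c ∈ s.toList)) : Int) := by
    intro c; rw [getD_counts]; simp [PySem.Dict.getD_empty]
  have hlen : PySem.List.len (k0 :: rest) = ((k0 :: rest).length : Int) := by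
    simp [PySem.List.len_eq]
  have hcongr : List.countP
      ((fun v => v == PySem.List.len (k0 :: rest)) ∘ (fun k =>
        ((k0 :: rest).foldl
          (fun d s => (PySem.List.dedup s.toList).foldl (fun d c => d.insert c (d.getD c 0 + 1)) d)
          (PySem.Dict.empty : PySem.Dict Char Int)).getD k 0))
      ((k0 :: rest).foldl
        (fun d s => (PySem.List.dedup s.toList).foldl (fun d c => d.insert c (d.getD c 0 + 1)) d)
        (PySem.Dict.empty : PySem.Dict Char Int)).keys
      = List.countP (fun c => decide (∀ s ∈ k0 :: rest, c ∈ s.toList))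
        ((k0 :: rest).foldl
          (fun d s => (PySem.List.dedup s.toList).foldl (fun d c => d.insert c (d.getD c 0 + 1)) d)
          (PySem.Dict.empty : PySem.Dict Char Int)).keys := by
    apply List.countP_congr
    intro c _
    simp only [Function.comp_apply, hgd, hlen]
    have heq : ((((k0 :: rest).countP (fun s => decide (c ∈ s.toList)) : Nat) : Int)
        = ((k0 :: rest).length : Int))
        ↔ (∀ s ∈ k0 :: rest, c ∈ s.toList) := by
      rw [Int.natCast_inj]
      constructor
      · intro h s hs
        have := List.countP_eq_length.mp h s hs
        simpa using this
      · intro h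
        exact List.countP_eq_length.mpr (fun s hs => by simpa using h s hs)
    rw [Bool.eq_iff_iff]
    simp only [beq_iff_eq, decide_eq_true_eq]
    simpa using heq
  rw [hcongr, List.countP_eq_length_filter]
  -- now both sides are lengths of Nodup lists with the same membership
  have hLnd : ((rest).foldl (fun letters declaration =>
      PySem.Set.inter letters (declaration.toList.foldl PySem.Set.add PySem.Set.empty))
      (PySem.Set.ofList k0.toList)).Nodup :=
    nodup_inter_fold _ _ (PySem.Set.nodup_ofList _)
  have hFnd : (((k0 :: rest).foldl
      (fun d s => (PySem.List.dedup s.toList).foldl (fun d c => d.insert c (d.getD c 0 + 1)) d)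
      (PySem.Dict.empty : PySem.Dict Char Int)).keys.filter (fun c => decide (∀ s ∈ k0 :: rest, c ∈ s.toList))).Nodup :=
    hkeysnd.filter _
  have hperm : ((rest).foldl (fun letters declaration =>
      PySem.Set.inter letters (declaration.toList.foldl PySem.Set.add PySem.Set.empty))
      (PySem.Set.ofList k0.toList)).Perm
      (((k0 :: rest).foldl
        (fun d s => (PySem.List.dedup s.toList).foldl (fun d c => d.insert c (d.getD c 0 + 1)) d)
        (PySem.Dict.empty : PySem.Dict Char Int)).keys.filter (fun c => decide (∀ s ∈ k0 :: rest, c ∈ s.toList))) := by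
    rw [List.perm_ext_iff_of_nodup hLnd hFnd]
    intro c
    rw [mem_inter_fold, List.mem_filter, mem_keys_counts]
    constructor
    · rintro ⟨h0, hr⟩
      have hP : ∀ s ∈ k0 :: rest, c ∈ s.toList := by
        intro s hs
        rcases List.mem_cons.mp hs with rfl | hs
        · simpa [PySem.Set.mem_ofList] using h0
        · exact hr s hs
      exact ⟨.inr ⟨k0, List.mem_cons_self, hP k0 List.mem_cons_self⟩, by simpa using hP⟩
    · rintro ⟨-, hP⟩
      have hP : ∀ s ∈ k0 :: rest, c ∈ s.toList := by simpa using hP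
      exact ⟨(PySem.Set.mem_ofList (y := c) (xs := k0.toList)).mpr (hP k0 List.mem_cons_self),
        fun s hs => hP s (List.mem_cons_of_mem _ hs)⟩
  simp only [PySem.Set.len]
  rw [hperm.length_eq]
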